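-- pv_equiv track=rewrite | github.com/Ewa-Anna/Advent-of-Code | 2015/Day_08/day_8_part_2.py | calculate_encoded_difference
-- ===== SOURCE A (Python) =====
-- def calculate_encoded_difference(strings):
--     total_original = 0
--     total_encoded = 0
--
--     for string in strings:
--         total_original += len(string)
--
--         encoded = string.replace("\\", "\\\\")
--         encoded = encoded.replace('"', '\\"')
--         encoded = f'"{encoded}"'
--
--         total_encoded += len(encoded)
--
--     return total_encoded - total_original
-- ===== SOURCE B (Python) =====
-- def calculate_encoded_difference(strings):
--     # Per string, encoding adds 2 surrounding quotes plus one extra char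
--     # per backslash and per quote; sum these deltas directly.
--     return sum(2 + s.count('\\') + s.count('"') for s in strings)
-- ===== Notes on version B (the rewrite author's own statement) =====
-- stated objective: simpler
-- what changed: B never builds the encoded strings: it sums a closed-form per-string delta (2 + backslash count + quote count) in one pass instead of constructing two replaced copies of each string and totalling two length accumulators.
import Mathlib
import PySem

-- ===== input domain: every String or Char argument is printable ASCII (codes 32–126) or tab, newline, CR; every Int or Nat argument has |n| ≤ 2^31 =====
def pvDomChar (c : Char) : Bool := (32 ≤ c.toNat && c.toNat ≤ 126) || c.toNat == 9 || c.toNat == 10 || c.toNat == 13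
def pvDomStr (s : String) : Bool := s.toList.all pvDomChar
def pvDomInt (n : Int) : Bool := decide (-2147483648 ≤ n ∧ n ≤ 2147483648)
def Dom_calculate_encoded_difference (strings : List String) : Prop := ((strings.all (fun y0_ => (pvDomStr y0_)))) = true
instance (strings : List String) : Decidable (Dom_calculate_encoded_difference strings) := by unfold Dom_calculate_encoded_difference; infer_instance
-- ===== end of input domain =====

-- B computes each string's encoding length delta in closed form (2 + count '\' + count '"') and
-- sums it in one pass, never building the encoded strings; objective: simpler.


-- ===== PORT A =====
-- literal transliteration: two running totals, encoded string built via replace and quoting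
def calculate_encoded_difference (strings : List String) : Int :=
  let totals := strings.foldl (fun (acc : Int × Int) string =>
    let total_original := acc.1 + PySem.Str.len string
    let encoded := PySem.Str.replace string "\\" "\\\\"
    let encoded := PySem.Str.replace encoded "\"" "\\\""
    let encoded := "\"" ++ encoded ++ "\""
    let total_encoded := acc.2 + PySem.Str.len encoded
    (total_original, total_encoded)) (0, 0)
  totals.2 - totals.1

-- ===== PORT B =====
-- literal transliteration of Source B: sum of per-string closed-form deltas
def calculate_encoded_difference_alt (strings : List String) : Int :=
  (strings.map (fun s => 2 + (PySem.Str.count s "\\" : Int) + (PySem.Str.count s "\"" : Int))).sum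

-- ===== PRECONDITION & SPEC =====
def Spec_calculate_encoded_difference (strings : List String) (out : Int) : Prop := out = calculate_encoded_difference_alt strings
instance (strings : List String) (out : Int) : Decidable (Spec_calculate_encoded_difference strings out) := by unfold Spec_calculate_encoded_difference; infer_instance

-- ===== CLAIM (what is proved, stated in full; the proofs are below) =====
def Claim_equal_calculate_encoded_difference : Prop := ∀ (strings : List String), Dom_calculate_encoded_difference strings → Spec_calculate_encoded_difference strings (calculate_encoded_difference strings)

-- ===== LEMMAS AND PROOFS =====

-- single-character replace is a flatMap
theorem replace_go_single (a : Char) (new : List Char) :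
    ∀ (fuel : Nat) (l acc : List Char), l.length ≤ fuel →
      PySem.Chars.replace.go [a] new fuel l acc
        = acc.reverse ++ l.flatMap (fun c => if c == a then new else [c]) := by
  intro fuel
  induction fuel with
  | zero =>
    intro l acc h
    have : l = [] := List.eq_nil_of_length_eq_zero (Nat.le_zero.mp h)
    subst this
    simp [PySem.Chars.replace.go]
  | succ n ih =>
    intro l acc h
    cases l with
    | nil => simp [PySem.Chars.replace.go]
    | cons c t =>
      have hlen : t.length ≤ n := by simpa using h
      by_cases hc : c = a
      · subst hc
        have hpre : List.isPrefixOf [c] (c :: t) = true := by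
          simp [List.isPrefixOf]
        simp only [PySem.Chars.replace.go, hpre, if_pos]
        rw [ih _ _ (by simpa using hlen)]
        simp
      · have hpre : List.isPrefixOf [a] (c :: t) = false := by
          simp [List.isPrefixOf, hc]
          intro h'; exact absurd h'.symm hc
        simp only [PySem.Chars.replace.go, hpre]
        rw [if_neg (by simp [hpre]), ih _ _ hlen]
        simp [hc]

theorem replace_single (a : Char) (new : List Char) (l : List Char) :
    PySem.Chars.replace l [a] new = l.flatMap (fun c => if c == a then new else [c]) := by
  have h := replace_go_single a new l.length l [] le_rfl
  simpa [PySem.Chars.replace] using h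

-- single-character count is List.count
theorem count_go_single (a : Char) :
    ∀ (fuel : Nat) (l : List Char) (acc : Nat), l.length ≤ fuel →
      PySem.Chars.count.go [a] fuel l acc = acc + l.count a := by
  intro fuel
  induction fuel with
  | zero =>
    intro l acc h
    have : l = [] := List.eq_nil_of_length_eq_zero (Nat.le_zero.mp h)
    subst this
    simp [PySem.Chars.count.go]
  | succ n ih =>
    intro l acc h
    cases l with
    | nil => simp [PySem.Chars.count.go]
    | cons c t =>
      have hlen : t.length ≤ n := by simpa using h
      by_cases hc : c = a
      · subst hc
        have hpre : List.isPrefixOf [c] (c :: t) = true := by simp [List.isPrefixOf]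
        simp only [PySem.Chars.count.go, hpre, if_pos]
        rw [ih _ _ (by simpa using hlen)]
        simp [List.count_cons]
        omega
      · have hpre : List.isPrefixOf [a] (c :: t) = false := by
          simp [List.isPrefixOf]
          intro h'; exact absurd h'.symm hc
        simp only [PySem.Chars.count.go, hpre]
        rw [if_neg (by simp [hpre]), ih _ _ hlen]
        simp [List.count_cons, hc]

theorem count_single (a : Char) (l : List Char) :
    PySem.Chars.count l [a] = l.count a := by
  have h := count_go_single a l.length l 0 le_rfl
  simpa [PySem.Chars.count] using h

-- length of the backslash-doubling flatMap
theorem length_flatMap_double (a : Char) (x y : Char) (l : List Char) :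
    (l.flatMap (fun c => if c == a then [x, y] else [c])).length = l.length + l.count a := by
  induction l with
  | nil => simp
  | cons c t ih =>
    simp only [List.flatMap_cons, List.length_append, List.count_cons, ih, List.length_cons]
    by_cases hc : c = a
    · simp [hc]; omega
    · simp [hc]; omega

-- doubling a ≠ b does not change the count of b
theorem count_flatMap_double (a b : Char) (hab : b ≠ a) (l : List Char) :
    (l.flatMap (fun c => if c == a then [a, a] else [c])).count b = l.count b := by
  induction l with
  | nil => simp
  | cons c t ih =>
    simp only [List.flatMap_cons, List.count_append, List.count_cons, ih]
    by_cases hc : c = a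
    · simp [hc, Ne.symm hab]
    · simp [hc, List.count_singleton]; omega

-- per-string delta: encoded length − original length = 2 + count '\' + count '"'
theorem per_string (s : String) :
    PySem.Str.len ("\"" ++ PySem.Str.replace (PySem.Str.replace s "\\" "\\\\") "\"" "\\\"" ++ "\"")
      - PySem.Str.len s
    = 2 + (PySem.Str.count s "\\" : Int) + (PySem.Str.count s "\"" : Int) := by
  have hbs : ("\\" : String).toList = ['\\'] := rfl
  have hq : ("\"" : String).toList = ['"'] := rfl
  have hbs2 : ("\\\\" : String).toList = ['\\', '\\'] := rfl
  have hbq : ("\\\"" : String).toList = ['\\', '"'] := rfl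
  simp only [PySem.Str.len_eq, PySem.Str.count_eq, String.toList_append,
    PySem.Str.toList_replace, hbs, hq, hbs2, hbq,
    replace_single, count_single]
  rw [List.length_append, List.length_append,
      length_flatMap_double '"' '\\' '"',
      length_flatMap_double '\\' '\\' '\\',
      count_flatMap_double '\\' '"' (by decide)]
  simp only [List.length_cons, List.length_nil]
  push_cast
  ring

theorem fold_invariant (l : List String) :
    ∀ (torig tenc : Int),
      (let totals := l.foldl (fun (acc : Int × Int) string =>
        let total_original := acc.1 + PySem.Str.len string
        let encoded := PySem.Str.replace string "\\" "\\\\"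
        let encoded := PySem.Str.replace encoded "\"" "\\\""
        let encoded := "\"" ++ encoded ++ "\""
        let total_encoded := acc.2 + PySem.Str.len encoded
        (total_original, total_encoded)) (torig, tenc)
      totals.2 - totals.1)
      = tenc - torig + (l.map (fun s => 2 + (PySem.Str.count s "\\" : Int) + (PySem.Str.count s "\"" : Int))).sum := by
  induction l with
  | nil => intro torig tenc; simp
  | cons s t ih =>
    intro torig tenc
    simp only [List.foldl_cons, List.map_cons, List.sum_cons]
    rw [ih]
    have := per_string s
    omega

-- ===== VERDICT (by name: the statement is the Claim_ definition above) =====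
theorem calculate_encoded_difference_spec : Claim_equal_calculate_encoded_difference := by
  intro strings _
  unfold Spec_calculate_encoded_difference calculate_encoded_difference calculate_encoded_difference_alt
  have := fold_invariant strings 0 0
  simpa using this
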